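-- pv_equiv track=rewrite | github.com/rgsingh/python-practice | src/designgurus/advcodepatterns/count_max_frequency.py | count_max_frequency
-- ===== SOURCE A (Python) =====
-- def count_max_frequency(nums):
--     default = len(nums) if len(set(nums)) == 1 else 0
--     total = default
--     num_array = {}
--     for num in nums:
--         if num in num_array:
--             num_array[num] += 1
--         else:
--             num_array[num] = 1
--
--     sorted_counts = sorted(num_array.values(), reverse=True)
--     last_count = None
--     for i in range(len(sorted_counts) - 1):
--         current_count = sorted_counts[i]
--         if last_count is None and last_count != current_count:
--             last_count = current_count
--         next_count = sorted_counts[i + 1]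
--         if current_count > next_count and current_count > total:
--             total = current_count
--         elif current_count == next_count and current_count == last_count and total == default:
--             total = current_count + next_count
--         elif current_count == next_count and current_count == last_count:
--             total += next_count
--     return total
-- ===== SOURCE B (Python) =====
-- def count_max_frequency(nums):
--     num_array = {}
--     for num in nums:
--         num_array[num] = num_array.get(num, 0) + 1
--     max_count = 0
--     tally = 0
--     for v in num_array.values():
--         if v > max_count:
--             max_count = v
--             tally = 1
--         elif v == max_count:
--             tally += 1
--     return max_count * tally
-- ===== Notes on version B (the rewrite author's own statement) =====
-- stated objective: simpler
-- what changed: Replaces A's pre-computed all-equal default, descending sort of the counts and grouped adjacent-pair window scan by a single linear pass over the raw count values that tracks the running maximum and how many counts attain it, returning max_count * tally.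
import Mathlib
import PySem

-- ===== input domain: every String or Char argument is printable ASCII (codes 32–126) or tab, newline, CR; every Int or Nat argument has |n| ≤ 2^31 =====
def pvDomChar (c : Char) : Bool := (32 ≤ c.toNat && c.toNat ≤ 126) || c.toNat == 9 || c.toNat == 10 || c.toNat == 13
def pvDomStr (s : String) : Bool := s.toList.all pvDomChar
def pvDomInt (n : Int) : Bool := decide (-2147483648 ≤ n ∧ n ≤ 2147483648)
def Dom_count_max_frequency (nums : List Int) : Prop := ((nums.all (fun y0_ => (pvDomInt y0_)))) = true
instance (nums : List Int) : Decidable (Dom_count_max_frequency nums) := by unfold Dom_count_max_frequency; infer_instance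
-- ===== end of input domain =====

-- B replaces A's all-equal default, descending sort of the counts and adjacent-pair window scan by
-- one linear pass over the raw count values tracking (running max, how many counts attain it); simpler, same results.

-- ===== PORT A =====
def count_max_frequency (nums : List Int) : Int :=
  let dflt : Int := if (PySem.Set.ofList nums).length = 1 then (nums.length : Int) else 0
  let numArray : PySem.Dict Int Int :=
    nums.foldl (fun d num =>
      if d.contains num then d.modify num 0 (· + 1) else d.insert num 1) PySem.Dict.empty
  let sortedCounts : List Int := PySem.List.sorted numArray.values (fun x => x) true
  let fin : Int × Option Int :=
    (PySem.List.pyRange 0 ((sortedCounts.length : Int) - 1) 1).foldl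
      (fun st i =>
        let currentCount := PySem.List.pyGetD sortedCounts i 0
        -- 'if last_count is None and last_count != current_count': 'None != int' is always True
        let lastCount : Option Int := if st.2 = none then some currentCount else st.2
        let nextCount := PySem.List.pyGetD sortedCounts (i + 1) 0
        let total : Int :=
          if currentCount > nextCount ∧ currentCount > st.1 then currentCount
          else if currentCount = nextCount ∧ some currentCount = lastCount ∧ st.1 = dflt then
            currentCount + nextCount
          else if currentCount = nextCount ∧ some currentCount = lastCount then st.1 + nextCount
          else st.1
        (total, lastCount))
      (dflt, none)
  fin.1

-- ===== PORT B =====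
def count_max_frequency_alt (nums : List Int) : Int :=
  let numArray : PySem.Dict Int Int :=
    nums.foldl (fun d num => d.insert num (d.getD num 0 + 1)) PySem.Dict.empty
  let fin : Int × Int :=
    numArray.values.foldl
      (fun st v => if v > st.1 then (v, 1) else if v = st.1 then (st.1, st.2 + 1) else st)
      (0, 0)
  fin.1 * fin.2

-- ===== PRECONDITION & SPEC =====
def Spec_count_max_frequency (nums : List Int) (out : Int) : Prop := out = count_max_frequency_alt nums
instance (nums : List Int) (out : Int) : Decidable (Spec_count_max_frequency nums out) := by unfold Spec_count_max_frequency; infer_instance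

-- ===== CLAIM (what is proved, stated in full; the proofs are below) =====
def Claim_equal_count_max_frequency : Prop := ∀ (nums : List Int), Dom_count_max_frequency nums → Spec_count_max_frequency nums (count_max_frequency nums)

-- ===== LEMMAS AND PROOFS =====

-- A's loop body on a consecutive pair (current, next) of the (descending) sorted counts, with default = 0.
def pvGA (st : Int × Option Int) (p : Int × Int) : Int × Option Int :=
  let lastCount : Option Int := if st.2 = none then some p.1 else st.2
  let total : Int :=
    if p.1 > p.2 ∧ p.1 > st.1 then p.1
    else if p.1 = p.2 ∧ some p.1 = lastCount ∧ st.1 = 0 then p.1 + p.2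
    else if p.1 = p.2 ∧ some p.1 = lastCount then st.1 + p.2
    else st.1
  (total, lastCount)

-- A's dict-building loop is collections.Counter
lemma pv_dictA_eq (nums : List Int) :
    nums.foldl (fun d num =>
        if d.contains num then d.modify num 0 (· + 1) else d.insert num 1)
      (PySem.Dict.empty : PySem.Dict Int Int) = PySem.Dict.counter nums := by
  rw [PySem.Dict.counter_eq_foldl]
  refine PySem.List.foldl_congr_mem nums _ _ _ ?_
  intro d x _
  by_cases h : d.contains x
  · simp [h]
  · have h0 : d.getD x 0 = 0 :=
      PySem.Dict.getD_of_not_contains d 0 (by simpa using h)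
    show (if d.contains x then _ else d.insert x 1) = d.insert x (d.getD x 0 + 1)
    rw [if_neg h, h0]
    norm_num

-- B's running (max, tally) loop, characterised
lemma pv_bLoop (l : List Int) (m t : Int) :
    l.foldl (fun st v => if v > st.1 then (v, 1) else if v = st.1 then (st.1, st.2 + 1) else st) (m, t)
      = (l.foldl max m,
         (if l.foldl max m = m then t else 0) + (l.count (l.foldl max m) : Int)) := by
  induction l generalizing m t with
  | nil => simp
  | cons v l ih =>
    simp only [List.foldl_cons]
    rcases lt_trichotomy m v with h | h | h
    · rw [if_pos h, ih]
      simp only [max_eq_right h.le, List.count_cons, Prod.mk.injEq, beq_iff_eq]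
      refine ⟨trivial, ?_⟩
      have hF := (PySem.List.le_foldl_max l v).1
      push_cast
      split_ifs <;> omega
    · subst h
      rw [if_neg (lt_irrefl m), if_pos rfl, ih]
      simp only [max_self, List.count_cons, Prod.mk.injEq, beq_iff_eq]
      refine ⟨trivial, ?_⟩
      push_cast
      split_ifs <;> omega
    · rw [if_neg (by omega), if_neg (by omega), ih]
      simp only [max_eq_left h.le, List.count_cons, Prod.mk.injEq, beq_iff_eq]
      refine ⟨trivial, ?_⟩
      have hF := (PySem.List.le_foldl_max l m).1
      push_cast
      split_ifs <;> omega

-- flat phase: once every remaining count is < c and ≤ total, A's loop changes nothing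
lemma pv_flat (l : List Int) : ∀ (x c total : Int),
    (∀ y ∈ x :: l, y ≤ total) → (∀ y ∈ x :: l, y < c) →
    ((x :: l).zip l).foldl pvGA (total, some c) = (total, some c) := by
  induction l with
  | nil => intro x c total _ _; rfl
  | cons y l ih =>
    intro x c total hle hlt
    have hx_le : x ≤ total := hle x (by simp)
    have hx_lt : x < c := hlt x (by simp)
    simp only [List.zip_cons_cons, List.foldl_cons]
    have h1 : ¬(x > y ∧ x > total) := by rintro ⟨-, h2⟩; omega
    have h2 : ¬(x = c) := by omega
    have hstep : pvGA (total, some c) (x, y) = (total, some c) := by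
      simp [pvGA, h1, h2]
    rw [hstep]
    exact ih y c total (fun z hz => hle z (List.mem_cons_of_mem x hz))
      (fun z hz => hlt z (List.mem_cons_of_mem x hz))

-- tie phase: while counts equal the maximum c keep adding c
lemma pv_tie (l : List Int) : ∀ (c j : Int), 1 ≤ c → 2 ≤ j →
    (c :: l).Pairwise (fun a b => b ≤ a) →
    ((c :: l).zip l).foldl pvGA (j * c, some c) = ((j + l.count c) * c, some c) := by
  induction l with
  | nil => intro c j hc hj _; simp
  | cons n l ih =>
    intro c j hc hj hp
    rw [List.pairwise_cons] at hp
    have hn : n ≤ c := hp.1 n (List.mem_cons_self ..)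
    have hjc : c + 1 ≤ j * c := by nlinarith
    simp only [List.zip_cons_cons, List.foldl_cons]
    rcases eq_or_lt_of_le hn with he | hlt
    · subst he
      have hstep : pvGA (j * n, some n) (n, n) = ((j + 1) * n, some n) := by
        have h2 : ¬(j * n = 0) := by omega
        simp [pvGA, h2]
        ring
      rw [hstep, ih n (j + 1) hc (by omega) hp.2]
      have hcnt : ((j : Int) + 1) + l.count n = j + (n :: l).count n := by
        simp [List.count_cons_self]; ring
      rw [hcnt]
    · have hstep : pvGA (j * c, some c) (c, n) = (j * c, some c) := by
        have h1 : ¬(c > n ∧ c > j * c) := by rintro ⟨-, h⟩; omega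
        have h2 : ¬(c = n) := by omega
        simp [pvGA, h1, h2]
      rw [List.pairwise_cons] at hp
      have hle : ∀ y ∈ n :: l, y ≤ n := by
        intro y hy
        rcases List.mem_cons.mp hy with h | h
        · omega
        · exact hp.2.1 y h
      rw [hstep, pv_flat l n c (j * c)
        (fun y hy => le_trans (hle y hy) (by omega))
        (fun y hy => lt_of_le_of_lt (hle y hy) hlt)]
      have hcnt : (n :: l).count c = 0 := by
        rw [List.count_eq_zero]
        intro hmem
        have := hle c hmem
        omega
      rw [hcnt]
      norm_num

-- A's whole loop on a descending, positive list of length ≥ 2 computes max * multiplicity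
lemma pv_start (c n : Int) (l : List Int) (hc : 1 ≤ c)
    (hp : (c :: n :: l).Pairwise (fun a b => b ≤ a)) :
    (((c :: n :: l).zip (n :: l)).foldl pvGA (0, none)).1 = c * ((c :: n :: l).count c : Int) := by
  rw [List.pairwise_cons] at hp
  have hn : n ≤ c := hp.1 n (List.mem_cons_self ..)
  simp only [List.zip_cons_cons, List.foldl_cons]
  rcases eq_or_lt_of_le hn with he | hlt
  · subst he
    have hstep : pvGA (0, none) (n, n) = (2 * n, some n) := by
      simp [pvGA]
      ring
    rw [hstep, pv_tie l n 2 hc (le_refl 2) hp.2]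
    simp [List.count_cons_self]
    ring
  · have hstep : pvGA (0, none) (c, n) = (c, some c) := by
      have h1 : c > n ∧ c > (0 : Int) := ⟨hlt, by omega⟩
      simp [pvGA, h1]
    rw [List.pairwise_cons] at hp
    have hle : ∀ y ∈ n :: l, y ≤ n := by
      intro y hy
      rcases List.mem_cons.mp hy with h | h
      · omega
      · exact hp.2.1 y h
    rw [hstep, pv_flat l n c c
      (fun y hy => le_trans (hle y hy) (by omega))
      (fun y hy => lt_of_le_of_lt (hle y hy) hlt)]
    have hcnt : (n :: l).count c = 0 := by
      rw [List.count_eq_zero]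
      intro hmem
      have := hle c hmem
      omega
    simp [List.count_cons_self, hcnt]

-- index loop over range(len-1) reading s[i], s[i+1] = fold over consecutive pairs
lemma pv_bridge (S : List Int) (init : Int × Option Int) :
    (PySem.List.pyRange 0 ((S.length : Int) - 1) 1).foldl
      (fun st i =>
        (if PySem.List.pyGetD S i 0 > PySem.List.pyGetD S (i + 1) 0 ∧
              PySem.List.pyGetD S i 0 > st.1 then
            PySem.List.pyGetD S i 0
          else
            if PySem.List.pyGetD S i 0 = PySem.List.pyGetD S (i + 1) 0 ∧
                (some (PySem.List.pyGetD S i 0) =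
                  if st.2 = none then some (PySem.List.pyGetD S i 0) else st.2) ∧
                st.1 = 0 then
              PySem.List.pyGetD S i 0 + PySem.List.pyGetD S (i + 1) 0
            else
              if PySem.List.pyGetD S i 0 = PySem.List.pyGetD S (i + 1) 0 ∧
                  some (PySem.List.pyGetD S i 0) =
                    (if st.2 = none then some (PySem.List.pyGetD S i 0) else st.2) then
                st.1 + PySem.List.pyGetD S (i + 1) 0
              else st.1,
          if st.2 = none then some (PySem.List.pyGetD S i 0) else st.2)) init
      = (S.zip S.tail).foldl pvGA init := by
  cases S with
  | nil =>
    rw [PySem.List.pyRange_one_eq_nil (by norm_num)]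
    rfl
  | cons x rest =>
    have hzlen : (((x :: rest).zip rest).length : Int) = ((x :: rest).length : Int) - 1 := by
      simp [List.length_zip]
    have htail : (x :: rest).tail = rest := rfl
    rw [htail, ← hzlen]
    rw [PySem.List.foldl_congr_mem _ _
      (fun st i => pvGA st (PySem.List.pyGetD ((x :: rest).zip rest) i (0, 0))) init ?_]
    · exact PySem.List.foldl_pyRange_zero_pyGetD' ((x :: rest).zip rest) (0, 0) pvGA init
    · intro st i hi
      rw [PySem.List.mem_pyRange_one] at hi
      have h0 : 0 ≤ i := hi.1
      have hlt : i.toNat < ((x :: rest).zip rest).length := by omega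
      have hltS : i.toNat < (x :: rest).length := by
        simp [List.length_zip] at hlt ⊢
        omega
      have hltS' : i.toNat + 1 < (x :: rest).length := by
        simp [List.length_zip] at hlt ⊢
        omega
      have hcur : PySem.List.pyGetD (x :: rest) i 0 = (x :: rest)[i.toNat] := by
        rw [PySem.List.pyGetD_of_nonneg _ _ h0, List.getD_eq_getElem _ _ hltS]
      have hnxt : PySem.List.pyGetD (x :: rest) (i + 1) 0 = (x :: rest)[i.toNat + 1] := by
        rw [PySem.List.pyGetD_of_nonneg _ _ (by omega), List.getD_eq_getElem]
        · congr 1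
          omega
        · omega
      have hpair : PySem.List.pyGetD ((x :: rest).zip rest) i (0, 0)
          = ((x :: rest)[i.toNat], (x :: rest)[i.toNat + 1]) := by
        rw [PySem.List.pyGetD_of_nonneg _ _ h0, List.getD_eq_getElem _ _ hlt]
        rw [List.getElem_zip]
        congr 1
      simp only [hcur, hnxt, hpair, pvGA]

-- ===== VERDICT (by name: the statement is the Claim_ definition above) =====
theorem count_max_frequency_spec : Claim_equal_count_max_frequency := by
  intro nums _
  unfold Spec_count_max_frequency count_max_frequency count_max_frequency_alt
  simp only [pv_dictA_eq, PySem.Dict.foldl_insert_getD_add_one_eq_counter]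
  rw [pv_bLoop]
  simp only [ite_self, zero_add]
  have hVeq : (PySem.Dict.counter nums).values
      = (PySem.Set.ofList nums).map (fun k => ((nums.count k : Nat) : Int)) := by
    show ((PySem.Dict.counter nums).items.map Prod.snd) = _
    rw [PySem.Dict.items_counter, List.map_map]
    rfl
  have hpos : ∀ v ∈ (PySem.Dict.counter nums).values, 1 ≤ v := by
    rw [hVeq]
    intro v hv
    rcases List.mem_map.mp hv with ⟨k, hk, rfl⟩
    have hkm : k ∈ nums := (PySem.Set.mem_ofList nums k).mp hk
    have hkc : 0 < nums.count k := List.count_pos_iff.mpr hkm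
    exact_mod_cast hkc
  have hlenV : (PySem.Dict.counter nums).values.length = (PySem.Set.ofList nums).length := by
    rw [hVeq, List.length_map]
  have hperm := PySem.List.sorted_perm (PySem.Dict.counter nums).values (fun x => x) true
  have hdesc := PySem.List.sorted_pairwise_rev (PySem.Dict.counter nums).values (fun x => x)
  cases hS : PySem.List.sorted (PySem.Dict.counter nums).values (fun x => x) true with
  | nil =>
    rw [hS] at hperm
    have hVnil : (PySem.Dict.counter nums).values = [] := List.Perm.eq_nil hperm.symm
    have hlen0 : (PySem.Set.ofList nums).length = 0 := by rw [← hlenV, hVnil]; rfl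
    rw [if_neg (by omega : ¬ (PySem.Set.ofList nums).length = 1)]
    rw [show ((List.length ([] : List Int) : Int) - 1) = -1 by simp,
      PySem.List.pyRange_one_eq_nil (by norm_num)]
    rw [hVnil]
    simp
  | cons c tS =>
    cases tS with
    | nil =>
      rw [hS] at hperm hdesc
      have hV1 : (PySem.Dict.counter nums).values = [c] := List.perm_singleton.mp hperm.symm
      have hlen1 : (PySem.Set.ofList nums).length = 1 := by rw [← hlenV, hV1]; rfl
      rw [if_pos hlen1]
      rw [show ((List.length [c] : Int) - 1) = 0 by simp, PySem.List.pyRange_one_eq_nil (le_refl 0)]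
      simp only [List.foldl_nil]
      rw [hV1]
      have hc1 : 1 ≤ c := hpos c (by rw [hV1]; simp)
      obtain ⟨k, hk⟩ : ∃ k, PySem.Set.ofList nums = [k] := List.length_eq_one_iff.mp hlen1
      have hcnt : c = (nums.count k : Int) := by
        have h2 := hVeq
        rw [hV1, hk] at h2
        simpa using h2
      have hall : ∀ b ∈ nums, k = b := by
        intro b hb
        have hb2 : b ∈ PySem.Set.ofList nums := (PySem.Set.mem_ofList nums b).mpr hb
        rw [hk] at hb2
        exact (List.mem_singleton.mp hb2).symm
      have hlen : nums.count k = nums.length := List.count_eq_length.mpr hall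
      simp [hcnt, hlen]
    | cons n tS' =>
      rw [hS] at hperm hdesc
      have hlen2 : (PySem.Set.ofList nums).length = tS'.length + 2 := by
        rw [← hlenV, ← hperm.length_eq]
        simp
      rw [if_neg (by omega : ¬ (PySem.Set.ofList nums).length = 1)]
      rw [pv_bridge (c :: n :: tS') (0, none)]
      have hcV : c ∈ (PySem.Dict.counter nums).values := hperm.mem_iff.mp (List.mem_cons_self ..)
      have hc1 : 1 ≤ c := hpos c hcV
      rw [show (c :: n :: tS').tail = n :: tS' from rfl]
      rw [pv_start c n tS' hc1 hdesc]
      have hub : ∀ y ∈ (PySem.Dict.counter nums).values, y ≤ c :=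
        PySem.List.key_head_sorted_rev_ge _ _ hS
      have hM : (PySem.Dict.counter nums).values.foldl max 0 = c := by
        have hcM : c ≤ (PySem.Dict.counter nums).values.foldl max 0 :=
          (PySem.List.le_foldl_max (PySem.Dict.counter nums).values 0).2 c hcV
        rcases PySem.List.foldl_max_mem (PySem.Dict.counter nums).values 0 with h | h
        · omega
        · have := hub _ h
          omega
      rw [hM, (hperm.count_eq c).symm]
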